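-- pv_equiv track=rewrite | github.com/dlwogk7939/HDR-SMood-Challenge-sample | src/data.py | choose_group_key
-- ===== SOURCE A (Python) =====
-- from typing import Any, Dict, List, Optional, Sequence, Tuple
--
-- def choose_group_key(events: Sequence[Dict[str, Any]], prefer_site: bool = True) -> str:
--     if prefer_site:
--         site_ids = {
--             str(event["site_id"])
--             for event in events
--             if event.get("site_id") not in (None, "", "None")
--         }
--         if len(site_ids) > 1:
--             return "site_id"
--     return "domain_id"
-- ===== SOURCE B (Python) =====
-- def choose_group_key(events, prefer_site=True):
--     if prefer_site:
--         first = None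
--         for event in events:
--             v = event.get("site_id")
--             if v in (None, "", "None"):
--                 continue
--             key = str(v)
--             if first is None:
--                 first = key
--             elif key != first:
--                 return "site_id"
--     return "domain_id"
-- ===== Notes on version B (the rewrite author's own statement) =====
-- stated objective: simpler
-- what changed: Replaces the set comprehension plus cardinality test with a single pass that remembers only the first valid site_id and returns early on the first differing one.
import Mathlib
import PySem

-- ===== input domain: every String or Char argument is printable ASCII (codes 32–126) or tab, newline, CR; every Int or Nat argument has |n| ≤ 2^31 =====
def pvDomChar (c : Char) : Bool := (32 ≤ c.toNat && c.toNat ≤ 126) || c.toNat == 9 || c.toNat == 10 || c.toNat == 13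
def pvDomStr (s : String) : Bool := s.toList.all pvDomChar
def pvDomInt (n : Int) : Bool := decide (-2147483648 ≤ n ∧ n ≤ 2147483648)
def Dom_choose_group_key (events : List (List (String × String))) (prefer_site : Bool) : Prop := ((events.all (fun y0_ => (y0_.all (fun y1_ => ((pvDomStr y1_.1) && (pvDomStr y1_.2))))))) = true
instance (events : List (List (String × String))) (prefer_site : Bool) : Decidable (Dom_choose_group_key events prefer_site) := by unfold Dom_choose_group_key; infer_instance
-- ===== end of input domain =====

-- B replaces A's set comprehension + cardinality test by a single pass that remembers only
-- the first valid site_id and returns early on the first differing one (objective: simpler).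

-- ===== PORT A =====
-- the set-comprehension filter/add step (str() is the identity on these string values)
def cgkStep (s : PySem.Set String) (event : List (String × String)) : PySem.Set String :=
  match (PySem.Dict.mk event).get? "site_id" with
  | none => s
  | some v => if v = "" ∨ v = "None" then s else PySem.Set.add s v

def choose_group_key (events : List (List (String × String))) (prefer_site : Bool) : String :=
  if prefer_site then
    let site_ids : PySem.Set String := events.foldl cgkStep PySem.Set.empty
    if 1 < PySem.Set.len site_ids then "site_id" else "domain_id"
  else "domain_id"

-- ===== PORT B =====
-- the single-pass loop carrying the first valid site_id seen so far
def cgkLoop : List (List (String × String)) → Option String → String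
  | [], _ => "domain_id"
  | event :: rest, first =>
    match (PySem.Dict.mk event).get? "site_id" with
    | none => cgkLoop rest first
    | some v =>
      if v = "" ∨ v = "None" then cgkLoop rest first
      else
        match first with
        | none => cgkLoop rest (some v)
        | some k => if v ≠ k then "site_id" else cgkLoop rest first

def choose_group_key_alt (events : List (List (String × String))) (prefer_site : Bool) : String :=
  if prefer_site then cgkLoop events none else "domain_id"

-- ===== PRECONDITION & SPEC =====
def Spec_choose_group_key (events : List (List (String × String))) (prefer_site : Bool) (out : String) : Prop := out = choose_group_key_alt events prefer_site
instance (events : List (List (String × String))) (prefer_site : Bool) (out : String) : Decidable (Spec_choose_group_key events prefer_site out) := by unfold Spec_choose_group_key; infer_instance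

-- ===== CLAIM (what is proved, stated in full; the proofs are below) =====
def Claim_equal_choose_group_key : Prop := ∀ (events : List (List (String × String))) (prefer_site : Bool), Dom_choose_group_key events prefer_site → Spec_choose_group_key events prefer_site (choose_group_key events prefer_site)

-- ===== LEMMAS AND PROOFS =====

-- one step never shrinks the set
theorem cgkStep_len_mono (s : PySem.Set String) (e : List (String × String)) :
    s.length ≤ (cgkStep s e).length := by
  unfold cgkStep
  cases (PySem.Dict.mk e).get? "site_id" with
  | none => exact le_refl _
  | some v =>
    simp only
    split_ifs with h
    · exact le_refl _
    · unfold PySem.Set.add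
      split_ifs <;> simp

-- folding never shrinks the set
theorem cgkFold_len_mono (events : List (List (String × String))) (s : PySem.Set String) :
    s.length ≤ (events.foldl cgkStep s).length := by
  induction events generalizing s with
  | nil => exact le_refl _
  | cons e rest ih => exact le_trans (cgkStep_len_mono s e) (ih _)

-- loop with a stored first key vs. fold from the singleton set {k}
theorem cgkLoop_some (events : List (List (String × String))) (k : String) :
    cgkLoop events (some k)
      = (if 1 < PySem.Set.len (events.foldl cgkStep (PySem.Set.add PySem.Set.empty k)) then "site_id" else "domain_id") := by
  induction events with
  | nil => simp [cgkLoop, PySem.Set.len, PySem.Set.add, PySem.Set.empty, PySem.Set.contains]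
  | cons e rest ih =>
    simp only [cgkLoop, List.foldl_cons]
    cases hg : (PySem.Dict.mk e).get? "site_id" with
    | none => simpa [cgkStep, hg] using ih
    | some v =>
      simp only [cgkStep, hg]
      by_cases h : v = "" ∨ v = "None"
      · rw [if_pos h, if_pos h]; exact ih
      · rw [if_neg h, if_neg h]
        by_cases hv : v = k
        · subst hv
          simp only [ne_eq, not_true_eq_false, if_false]
          have : PySem.Set.add (PySem.Set.add PySem.Set.empty v) v = PySem.Set.add PySem.Set.empty v := by
            simp [PySem.Set.add, PySem.Set.empty, PySem.Set.contains]
          rw [this]; exact ih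
        · have hne : v ≠ k := hv
          simp only [ne_eq, hne, not_false_eq_true, if_true]
          have h2 : (PySem.Set.add (PySem.Set.add PySem.Set.empty k) v).length = 2 := by
            simp [PySem.Set.add, PySem.Set.empty, PySem.Set.contains, hv]
          have := cgkFold_len_mono rest (PySem.Set.add (PySem.Set.add PySem.Set.empty k) v)
          rw [h2] at this
          have hlen : 1 < PySem.Set.len (rest.foldl cgkStep (PySem.Set.add (PySem.Set.add PySem.Set.empty k) v)) := by
            unfold PySem.Set.len; exact_mod_cast lt_of_lt_of_le (by norm_num) this
          rw [if_pos hlen]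

-- loop from scratch vs. fold from the empty set
theorem cgkLoop_none (events : List (List (String × String))) :
    cgkLoop events none
      = (if 1 < PySem.Set.len (events.foldl cgkStep PySem.Set.empty) then "site_id" else "domain_id") := by
  induction events with
  | nil => simp [cgkLoop, PySem.Set.len, PySem.Set.empty]
  | cons e rest ih =>
    simp only [cgkLoop, List.foldl_cons]
    cases hg : (PySem.Dict.mk e).get? "site_id" with
    | none => simpa [cgkStep, hg] using ih
    | some v =>
      simp only [cgkStep, hg]
      by_cases h : v = "" ∨ v = "None"
      · rw [if_pos h, if_pos h]; exact ih
      · rw [if_neg h, if_neg h]; exact cgkLoop_some rest v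

-- ===== VERDICT (by name: the statement is the Claim_ definition above) =====
theorem choose_group_key_spec : Claim_equal_choose_group_key := by
  intro events prefer_site _
  unfold Spec_choose_group_key choose_group_key choose_group_key_alt
  cases prefer_site with
  | false => simp
  | true => simp [cgkLoop_none]
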